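-- pv_equiv track=rewrite | github.com/Hmbown/Butterfly | hcsa/cycles.py | log_landmark_blocks
-- ===== SOURCE A (Python) =====
-- def log_landmark_blocks(num_blocks: int) -> list[int]:
--     """Return fixed log-spaced landmark block ids: 0, 1, 2, 4, 8, ..."""
--     if num_blocks <= 0:
--         raise ValueError("num_blocks must be positive")
--     landmarks = [0]
--     stride = 1
--     while stride < int(num_blocks):
--         landmarks.append(int(stride))
--         stride *= 2
--     return sorted(set(landmarks))
-- ===== SOURCE B (Python) =====
-- def log_landmark_blocks(num_blocks: int) -> list[int]:
--     """Return fixed log-spaced landmark block ids: 0, 1, 2, 4, 8, ..."""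
--     if num_blocks <= 0:
--         raise ValueError("num_blocks must be positive")
--     m = int(num_blocks)
--     count = 0 if m < 1 else (m - 1).bit_length()
--     return [0] + [2 ** k for k in range(count)]
-- ===== Notes on version B (the rewrite author's own statement) =====
-- stated objective: idiomatic
-- what changed: Replaces the doubling while-loop plus sorted(set(...)) with a closed-form term count ((m-1).bit_length()) and a direct comprehension of powers of two, already sorted and duplicate-free.
import Mathlib
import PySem

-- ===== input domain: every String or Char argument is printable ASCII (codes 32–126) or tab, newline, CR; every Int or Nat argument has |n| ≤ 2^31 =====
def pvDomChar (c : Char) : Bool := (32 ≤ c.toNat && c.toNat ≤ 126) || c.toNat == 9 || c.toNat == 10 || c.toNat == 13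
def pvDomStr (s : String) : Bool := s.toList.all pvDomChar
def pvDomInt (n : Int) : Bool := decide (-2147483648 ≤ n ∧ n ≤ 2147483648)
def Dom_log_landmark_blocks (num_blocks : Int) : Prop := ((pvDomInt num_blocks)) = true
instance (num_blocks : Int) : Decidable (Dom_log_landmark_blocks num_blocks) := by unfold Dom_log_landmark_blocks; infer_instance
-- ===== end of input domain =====

-- B replaces A's doubling while-loop + sorted(set(...)) by a closed-form term count
-- ((m-1).bit_length()) and a direct list of powers of two (idiomatic; same cost).

-- ===== PORT A =====
-- the while-loop of A, with fuel; under Dom (num_blocks ≤ 2^31) the stride, doubling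
-- from 1, exceeds the bound within 64 iterations, so fuel 64 never runs out on Dom.
def loopA : Nat → Int → Int → List Int → List Int
  | 0, _, _, acc => acc
  | f + 1, m, stride, acc =>
    if stride < m then loopA f m (stride * 2) (acc ++ [stride]) else acc

def log_landmark_blocks (num_blocks : Int) : List Int :=
  if num_blocks ≤ 0 then []  -- Python raises ValueError here; excluded by Pre_
  else PySem.List.sorted (PySem.Set.ofList (loopA 64 num_blocks 1 [0])) (fun x => x) false

-- ===== PORT B =====
def log_landmark_blocks_alt (num_blocks : Int) : List Int :=
  if num_blocks ≤ 0 then []  -- Python raises ValueError here; excluded by Pre_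
  else
    let m := num_blocks
    let count := if m < 1 then 0 else Nat.size (m - 1).toNat  -- (m-1).bit_length()
    0 :: (List.range count).map (fun k => (2 : Int) ^ k)

-- ===== PRECONDITION & SPEC =====
-- A raises ValueError exactly when num_blocks ≤ 0.
def Pre_log_landmark_blocks (num_blocks : Int) : Prop := 0 < num_blocks
instance (num_blocks : Int) : Decidable (Pre_log_landmark_blocks num_blocks) := by
  unfold Pre_log_landmark_blocks; infer_instance

def pvWitness_log_landmark_blocks : Int := (5)

def Spec_log_landmark_blocks (num_blocks : Int) (out : List Int) : Prop :=
  out = log_landmark_blocks_alt num_blocks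
instance (num_blocks : Int) (out : List Int) : Decidable (Spec_log_landmark_blocks num_blocks out) := by
  unfold Spec_log_landmark_blocks; infer_instance

-- ===== CLAIM (what is proved, stated in full; the proofs are below) =====
def Claim_equal_log_landmark_blocks : Prop := ∀ (num_blocks : Int), Dom_log_landmark_blocks num_blocks → Pre_log_landmark_blocks num_blocks → Spec_log_landmark_blocks num_blocks (log_landmark_blocks num_blocks)

-- ===== LEMMAS AND PROOFS =====

-- Set.ofList keeps a duplicate-free list as it is.
theorem foldl_add_nodup {s xs : List Int} (hd : ∀ x ∈ xs, x ∉ s) (hn : xs.Nodup) :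
    xs.foldl PySem.Set.add s = s ++ xs := by
  induction xs generalizing s with
  | nil => simp
  | cons x t ih =>
    have hx : x ∉ s := hd x (by simp)
    have hadd : PySem.Set.add s x = s ++ [x] := by
      simp [PySem.Set.add, PySem.Set.contains, hx]
    have hn' := List.nodup_cons.mp hn
    have hd' : ∀ y ∈ t, y ∉ s ++ [x] := by
      intro y hy
      simp only [List.mem_append, List.mem_singleton]
      rintro (h | rfl)
      · exact hd y (List.mem_cons_of_mem _ hy) h
      · exact hn'.1 hy
    simp only [List.foldl_cons, hadd, ih hd' hn'.2, List.append_assoc,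
      List.singleton_append]

theorem ofList_nodup {xs : List Int} (hn : xs.Nodup) : PySem.Set.ofList xs = xs := by
  have := foldl_add_nodup (s := []) (xs := xs) (by simp) hn
  simpa [PySem.Set.ofList_eq_foldl] using this

-- characterisation of A's loop: starting at stride = 2^k it appends exactly the
-- powers 2^k, …, 2^(c-1) where c = (m-1).bit_length(), provided enough fuel.
theorem loopA_eq (m : Int) (hm : 1 ≤ m) (f k : Nat) (acc : List Int)
    (hf : Nat.size (m - 1).toNat ≤ k + f) :
    loopA f m ((2 : Int) ^ k) acc =
      acc ++ (List.range (Nat.size (m - 1).toNat - k)).map (fun i => (2 : Int) ^ (k + i)) := by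
  set c := Nat.size (m - 1).toNat with hc
  have hiff : ∀ j : Nat, ((2 : Int) ^ j < m) ↔ j < c := by
    intro j
    rw [hc, Nat.lt_size]
    constructor
    · intro h
      have h1 : (2 : Int) ^ j ≤ m - 1 := by omega
      have : ((2 : Nat) ^ j : Int) ≤ ((m - 1).toNat : Int) := by
        push_cast
        omega
      exact_mod_cast this
    · intro h
      have : ((2 : Nat) ^ j : Int) ≤ ((m - 1).toNat : Int) := by exact_mod_cast h
      push_cast at this
      omega
  induction f generalizing k acc with
  | zero =>
    have : c - k = 0 := by omega
    simp [loopA, this]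
  | succ f ih =>
    by_cases hlt : (2 : Int) ^ k < m
    · have hk : k < c := (hiff k).mp hlt
      have hpow : (2 : Int) ^ k * 2 = (2 : Int) ^ (k + 1) := by ring
      have := ih (k + 1) (acc ++ [(2 : Int) ^ k]) (by omega)
      rw [loopA, if_pos hlt, hpow, this]
      have hck : c - k = (c - (k + 1)) + 1 := by omega
      rw [hck, List.range_succ_eq_map]
      have hfun : ((fun i => (2 : Int) ^ (k + i)) ∘ Nat.succ) = (fun i => (2 : Int) ^ (k + 1 + i)) := by
        funext i
        simp only [Function.comp]
        congr 1
        omega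
      simp only [List.map_cons, List.map_map, hfun, Nat.add_zero, List.append_assoc,
        List.singleton_append]
    · have hk : c ≤ k := by
        by_contra h
        exact hlt ((hiff k).mpr (by omega))
      have : c - k = 0 := by omega
      rw [loopA, if_neg hlt, this]
      simp

-- the list 0 :: [2^0, …, 2^(c-1)] is strictly increasing
theorem powers_pairwise (c : Nat) :
    ((0 : Int) :: (List.range c).map (fun k => (2 : Int) ^ k)).Pairwise (· < ·) := by
  rw [List.pairwise_cons]
  constructor
  · intro a ha
    simp only [List.mem_map, List.mem_range] at ha
    obtain ⟨k, _, rfl⟩ := ha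
    positivity
  · rw [List.pairwise_map]
    apply List.Pairwise.imp _ (List.pairwise_lt_range (n := c))
    intro a b h
    have : (2 : ℕ) ^ a < 2 ^ b := Nat.pow_lt_pow_right (by norm_num) h
    exact_mod_cast this

-- ===== VERDICT (by name: the statement is the Claim_ definition above) =====
theorem log_landmark_blocks_spec : Claim_equal_log_landmark_blocks := by
  intro n hdom hpre
  unfold Spec_log_landmark_blocks log_landmark_blocks log_landmark_blocks_alt
  have hpos : 0 < n := hpre
  have hn0 : ¬ n ≤ 0 := by omega
  rw [if_neg hn0, if_neg hn0]
  have hbound : n ≤ 2147483648 := by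
    have := of_decide_eq_true (by simpa [pvDomInt, Dom_log_landmark_blocks] using hdom : decide (-2147483648 ≤ n ∧ n ≤ 2147483648) = true)
    omega
  set c := Nat.size (n - 1).toNat with hc
  have hcle : c ≤ 64 := by
    rw [hc, Nat.size_le]
    have h1 : (n - 1).toNat < 2 ^ 31 := by omega
    calc (n - 1).toNat < 2 ^ 31 := h1
      _ ≤ 2 ^ 64 := by norm_num
  have hloop := loopA_eq n (by omega) 64 0 [0] (by omega)
  simp only [pow_zero, Nat.sub_zero, zero_add] at hloop
  rw [hloop]
  show _ = (0 : Int) :: (List.range (if n < 1 then 0 else Nat.size (n - 1).toNat)).map (fun k => (2 : Int) ^ k)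
  rw [if_neg (show ¬ n < 1 by omega)]
  have hL : ([0] ++ (List.range c).map (fun i => (2 : Int) ^ i)) =
      (0 : Int) :: (List.range c).map (fun k => (2 : Int) ^ k) := by simp
  rw [hL]
  have hpw := powers_pairwise c
  have hnd : ((0 : Int) :: (List.range c).map (fun k => (2 : Int) ^ k)).Nodup :=
    hpw.imp (fun h => ne_of_lt h)
  rw [ofList_nodup hnd]
  exact PySem.List.sorted_eq_of_perm_of_pairwise_lt _ _ _ (List.Perm.refl _) hpw
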